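-- pv_equiv track=rewrite | github.com/aessayeg/ytempire-mvp | ml-pipeline/src/voice_synthesis.py | _split_script
-- ===== SOURCE A (Python) =====
-- from typing import Dict, Any, List, Optional, Union
--
-- def _split_script(script_text: str, max_chars: int = 1000) -> List[str]:
--     """Split script into manageable segments"""
--     # Split by paragraphs first
--     paragraphs = script_text.split('\n\n')
--
--     segments = []
--     current_segment = ""
--
--     for paragraph in paragraphs:
--         # If paragraph is too long, split by sentences
--         if len(paragraph) > max_chars:
--             sentences = paragraph.split('. ')
--             for sentence in sentences:
--                 if len(current_segment) + len(sentence) < max_chars: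
--                     current_segment += sentence + ". "
--                 else:
--                     if current_segment:
--                         segments.append(current_segment.strip())
--                     current_segment = sentence + ". "
--         else:
--             if len(current_segment) + len(paragraph) < max_chars:
--                 current_segment += paragraph + "\n\n"
--             else:
--                 if current_segment:
--                     segments.append(current_segment.strip())
--                 current_segment = paragraph + "\n\n"
--
--     # Add remaining segment
--     if current_segment:
--         segments.append(current_segment.strip())
--
--     return segments
-- ===== SOURCE B (Python) =====
-- def _split_script(script_text: str, max_chars: int = 1000):
--     """Split script into segments: flatten to units, then find each segment's
--     extent with a pure integer length scan and render it with one join+strip."""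
--     units = []
--     for p in script_text.split('\n\n'):
--         if len(p) > max_chars:
--             for s in p.split('. '):
--                 units.append((s, '. '))
--         else:
--             units.append((p, '\n\n'))
--     out = []
--     i, n = 0, len(units)
--     while i < n:
--         acc = len(units[i][0]) + len(units[i][1])
--         j = i + 1
--         while j < n and acc + len(units[j][0]) < max_chars:
--             acc += len(units[j][0]) + len(units[j][1])
--             j += 1
--         out.append(''.join(t + s for t, s in units[i:j]).strip())
--         i = j
--     return out
-- ===== Notes on version B (the rewrite author's own statement) =====
-- stated objective: alternative
-- what changed: B drops A's fused loop with its growing string accumulator and conditional flush: it flattens the text into (text,suffix) units, determines each segment's extent by a pure integer length scan over the units, and renders each block once with join+strip.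
import Mathlib
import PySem

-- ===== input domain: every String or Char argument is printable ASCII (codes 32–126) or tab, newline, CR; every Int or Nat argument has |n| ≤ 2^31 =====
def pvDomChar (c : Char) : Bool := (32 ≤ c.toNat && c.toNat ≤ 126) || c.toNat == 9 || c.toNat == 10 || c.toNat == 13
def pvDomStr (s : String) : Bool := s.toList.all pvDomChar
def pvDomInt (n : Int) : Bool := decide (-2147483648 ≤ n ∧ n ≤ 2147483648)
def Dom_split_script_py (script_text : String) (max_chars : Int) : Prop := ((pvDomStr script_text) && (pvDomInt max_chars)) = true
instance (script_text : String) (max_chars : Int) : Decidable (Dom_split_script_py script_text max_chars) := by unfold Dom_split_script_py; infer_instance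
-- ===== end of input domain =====

-- B replaces A's fused loop (string accumulator + conditional flush) by: flatten to (text,suffix)
-- units, find each segment's extent with a pure integer length scan, render it with one join+strip.
-- Same values on every input; no speed claim. Ports work on List Char (PySem.Chars).

-- ===== PORT A =====
-- the body of A's paragraph loop: either the inner sentence loop, or the paragraph branches
def pvStepA (max_chars : Int) (acc : List (List Char) × List Char) (para : List Char) :
    List (List Char) × List Char :=
  if (para.length : Int) > max_chars then
    (PySem.Chars.splitOn para ('.' :: [' '])).foldl (fun acc sentence =>
      if (acc.2.length : Int) + (sentence.length : Int) < max_chars then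
        (acc.1, acc.2 ++ sentence ++ ('.' :: [' ']))
      else
        ((if acc.2 ≠ [] then acc.1 ++ [PySem.Chars.strip acc.2] else acc.1),
         sentence ++ ('.' :: [' ']))) acc
  else
    if (acc.2.length : Int) + (para.length : Int) < max_chars then
      (acc.1, acc.2 ++ para ++ ('\n' :: ['\n']))
    else
      ((if acc.2 ≠ [] then acc.1 ++ [PySem.Chars.strip acc.2] else acc.1),
       para ++ ('\n' :: ['\n']))

def split_script_py (script_text : String) (max_chars : Int) : List String :=
  let paragraphs := PySem.Chars.splitOn script_text.toList ('\n' :: ['\n'])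
  let r := paragraphs.foldl (pvStepA max_chars) ([], [])
  (if r.2 ≠ [] then r.1 ++ [PySem.Chars.strip r.2] else r.1).map String.ofList

-- ===== PORT B =====
-- phase 1: the flat list of (text, suffix) units
def pvUnits (max_chars : Int) (paragraphs : List (List Char)) : List (List Char × List Char) :=
  paragraphs.flatMap (fun p =>
    if (p.length : Int) > max_chars then
      (PySem.Chars.splitOn p ('.' :: [' '])).map (fun s => (s, '.' :: [' ']))
    else
      [(p, '\n' :: ['\n'])])

-- Source B's inner while loop: how many further units after the forced first one join the segment
def pvCount (max_chars : Int) (acc : Int) : List (List Char × List Char) → Nat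
  | [] => 0
  | u :: us =>
      if acc + (u.1.length : Int) < max_chars then
        pvCount max_chars (acc + u.1.length + u.2.length) us + 1
      else 0

-- ''.join(t + s for t, s in block).strip()
def pvRender (g : List (List Char × List Char)) : List Char :=
  PySem.Chars.strip (g.flatMap (fun u => u.1 ++ u.2))

-- Source B's outer while loop: slice off one segment's block, render it, continue on the rest
def pvSegsB (max_chars : Int) : List (List Char × List Char) → List (List Char)
  | [] => []
  | u :: us =>
      let k := pvCount max_chars ((u.1.length : Int) + (u.2.length : Int)) us
      pvRender (u :: us.take k) :: pvSegsB max_chars (us.drop k)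
  termination_by us => us.length
  decreasing_by simp

def split_script_py_alt (script_text : String) (max_chars : Int) : List String :=
  let units := pvUnits max_chars (PySem.Chars.splitOn script_text.toList ('\n' :: ['\n']))
  (pvSegsB max_chars units).map String.ofList

-- ===== PRECONDITION & SPEC =====
def Spec_split_script_py (script_text : String) (max_chars : Int) (out : List String) : Prop := out = split_script_py_alt script_text max_chars
instance (script_text : String) (max_chars : Int) (out : List String) : Decidable (Spec_split_script_py script_text max_chars out) := by unfold Spec_split_script_py; infer_instance

-- ===== CLAIM (what is proved, stated in full; the proofs are below) =====
def Claim_equal_split_script_py : Prop := ∀ (script_text : String) (max_chars : Int), Dom_split_script_py script_text max_chars → Spec_split_script_py script_text max_chars (split_script_py script_text max_chars)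

-- ===== LEMMAS AND PROOFS =====

-- proof-side view of A's packing: one unit step of the greedy accumulator loop
def pvPack (max_chars : Int) (acc : List (List Char) × List Char) (u : List Char × List Char) :
    List (List Char) × List Char :=
  if (acc.2.length : Int) + (u.1.length : Int) < max_chars then
    (acc.1, acc.2 ++ u.1 ++ u.2)
  else
    ((if acc.2 ≠ [] then acc.1 ++ [PySem.Chars.strip acc.2] else acc.1), u.1 ++ u.2)

-- common intermediary: the segments produced from a nonempty current string c and remaining units
def pvCont (max_chars : Int) (c : List Char) : List (List Char × List Char) → List (List Char)
  | [] => [PySem.Chars.strip c]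
  | u :: us =>
      if (c.length : Int) + (u.1.length : Int) < max_chars then
        pvCont max_chars (c ++ u.1 ++ u.2) us
      else
        PySem.Chars.strip c :: pvCont max_chars (u.1 ++ u.2) us

-- one paragraph of A's loop equals packing that paragraph's units
theorem pvStepA_eq_foldl_units (m : Int) (acc : List (List Char) × List Char) (p : List Char) :
    pvStepA m acc p =
      (if (p.length : Int) > m then
        (PySem.Chars.splitOn p ('.' :: [' '])).map (fun s => (s, '.' :: [' ']))
       else [(p, '\n' :: ['\n'])]).foldl (pvPack m) acc := by
  unfold pvStepA
  by_cases h : (p.length : Int) > m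
  · rw [if_pos h, if_pos h, List.foldl_map]
    rfl
  · rw [if_neg h, if_neg h]
    rfl

-- A's paragraph fold equals the pack fold over the flattened unit list
theorem foldl_stepA_eq_foldl_units (m : Int) (ps : List (List Char))
    (acc : List (List Char) × List Char) :
    ps.foldl (pvStepA m) acc = (pvUnits m ps).foldl (pvPack m) acc := by
  induction ps generalizing acc with
  | nil => rfl
  | cons p ps ih =>
      simp only [List.foldl_cons, pvUnits, List.flatMap_cons, List.foldl_append]
      rw [pvStepA_eq_foldl_units]
      exact ih _

-- every unit has a nonempty text++suffix (the suffix is ". " or "\n\n")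
theorem pvUnits_snd_ne (m : Int) (ps : List (List Char)) :
    ∀ u ∈ pvUnits m ps, u.1 ++ u.2 ≠ [] := by
  intro u hu
  simp only [pvUnits, List.mem_flatMap] at hu
  obtain ⟨p, _, hp⟩ := hu
  split at hp
  · simp only [List.mem_map] at hp
    obtain ⟨s, _, rfl⟩ := hp
    simp
  · simp only [List.mem_singleton] at hp
    subst hp
    simp

-- A side: finalized pack fold from a nonempty current equals pvCont
theorem pack_fold_eq_cont (m : Int) (us : List (List Char × List Char)) :
    ∀ (segs : List (List Char)) (c : List Char), c ≠ [] → (∀ u ∈ us, u.1 ++ u.2 ≠ []) →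
    (let r := us.foldl (pvPack m) (segs, c);
     if r.2 ≠ [] then r.1 ++ [PySem.Chars.strip r.2] else r.1) = segs ++ pvCont m c us := by
  induction us with
  | nil =>
      intro segs c hc _
      simp [pvCont, hc]
  | cons u us ih =>
      intro segs c hc hne
      simp only [List.foldl_cons, pvCont]
      by_cases h : (c.length : Int) + (u.1.length : Int) < m
      · rw [if_pos h]
        have : pvPack m (segs, c) u = (segs, c ++ u.1 ++ u.2) := by
          simp [pvPack, h]
        rw [this]
        exact ih segs (c ++ u.1 ++ u.2) (by simp [hc]) (fun v hv => hne v (List.mem_cons_of_mem _ hv))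
      · rw [if_neg h]
        have : pvPack m (segs, c) u = (segs ++ [PySem.Chars.strip c], u.1 ++ u.2) := by
          simp [pvPack, h, hc]
        rw [this]
        rw [ih (segs ++ [PySem.Chars.strip c]) (u.1 ++ u.2)
              (hne u List.mem_cons_self) (fun v hv => hne v (List.mem_cons_of_mem _ hv))]
        simp

-- B side: pvCont equals Source B's extent-scan/slice recursion
theorem cont_eq_segsB (m : Int) (us : List (List Char × List Char)) :
    ∀ (c : List Char),
    pvCont m c us =
      PySem.Chars.strip (c ++ (us.take (pvCount m (c.length : Int) us)).flatMap (fun u => u.1 ++ u.2))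
        :: pvSegsB m (us.drop (pvCount m (c.length : Int) us)) := by
  induction us with
  | nil =>
      intro c
      simp [pvCont, pvCount, pvSegsB.eq_1]
  | cons u us ih =>
      intro c
      simp only [pvCont, pvCount]
      by_cases h : (c.length : Int) + (u.1.length : Int) < m
      · rw [if_pos h, if_pos h]
        have hlen : ((c ++ u.1 ++ u.2).length : Int) = (c.length : Int) + u.1.length + u.2.length := by
          simp [List.length_append]; ring
        rw [ih (c ++ u.1 ++ u.2), hlen]
        simp [List.flatMap_cons, List.append_assoc]
      · rw [if_neg h, if_neg h]
        simp only [List.take_zero, List.drop_zero, List.flatMap_nil, List.append_nil]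
        rw [pvSegsB.eq_2]
        have hlen : ((u.1 ++ u.2).length : Int) = (u.1.length : Int) + u.2.length := by
          simp [List.length_append]
        rw [ih (u.1 ++ u.2), hlen]
        simp [pvRender, List.flatMap_cons, List.append_assoc]

-- the first pack step from the empty current always just starts the segment
theorem pack_empty (m : Int) (u : List Char × List Char) :
    pvPack m ([], []) u = ([], u.1 ++ u.2) := by
  simp [pvPack]

-- ===== VERDICT (by name: the statement is the Claim_ definition above) =====
theorem split_script_py_spec : Claim_equal_split_script_py := by
  intro s m _
  unfold Spec_split_script_py split_script_py split_script_py_alt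
  simp only [foldl_stepA_eq_foldl_units]
  have hne := pvUnits_snd_ne m (PySem.Chars.splitOn s.toList ('\n' :: ['\n']))
  cases hu : pvUnits m (PySem.Chars.splitOn s.toList ('\n' :: ['\n'])) with
  | nil => simp [pvSegsB]
  | cons u us =>
      rw [hu] at hne
      simp only [List.foldl_cons, pack_empty]
      have h1 := pack_fold_eq_cont m us [] (u.1 ++ u.2)
        (hne u List.mem_cons_self) (fun v hv => hne v (List.mem_cons_of_mem _ hv))
      simp only [] at h1
      rw [h1, List.nil_append]
      have hlen : ((u.1 ++ u.2).length : Int) = (u.1.length : Int) + u.2.length := by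
        simp [List.length_append]
      rw [cont_eq_segsB m us (u.1 ++ u.2), hlen, pvSegsB.eq_2]
      simp [pvRender, List.flatMap_cons, List.append_assoc]
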